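-- pv_equiv track=rewrite | github.com/ericvanderwal/UnityAppTools | PythonExamples/HerbData.py | GetUniqueHerbList
-- ===== SOURCE A (Python) =====
-- def GetUniqueHerbList(listOfFormulas):
--     """Get a list of unique herbs from the list of formulas. Only every herb once"""
--     # make singe list of all of the herbs
--     singleHerbList = []
--     for formula in listOfFormulas:
--         for herb in formula[1:]:
--             singleHerbList.append(herb)
--     # get a list of just unique herbs
--     uniqueHerbList = []
--     for herb in singleHerbList:
--         if herb not in uniqueHerbList:
--             uniqueHerbList.append(herb)
--     # remove dirty words from unique list
--     if "" in uniqueHerbList: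
--         uniqueHerbList.remove("")
--     if "?" in uniqueHerbList:
--         uniqueHerbList.remove("?")
--     # sort list
--     uniqueHerbList.sort()
--     return uniqueHerbList
-- ===== SOURCE B (Python) =====
-- def GetUniqueHerbList(listOfFormulas):
--     """Get a list of unique herbs from the list of formulas. Only every herb once"""
--     # gather every herb occurrence, sort first
--     allHerbs = []
--     for formula in listOfFormulas:
--         allHerbs.extend(formula[1:])
--     allHerbs.sort()
--     # one pass over the sorted list: skip repeats of the previous value and junk entries
--     result = []
--     prev = None
--     for herb in allHerbs:
--         if herb != prev and herb != "" and herb != "?":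
--             result.append(herb)
--         prev = herb
--     return result
-- ===== Notes on version B (the rewrite author's own statement) =====
-- stated objective: faster
-- what changed: Replaces A's O(n^2) 'not in uniqueHerbList' membership dedup plus post-hoc junk removal and final sort by sorting the full flattened list first and doing one linear scan that drops adjacent duplicates and junk entries.
import Mathlib
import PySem

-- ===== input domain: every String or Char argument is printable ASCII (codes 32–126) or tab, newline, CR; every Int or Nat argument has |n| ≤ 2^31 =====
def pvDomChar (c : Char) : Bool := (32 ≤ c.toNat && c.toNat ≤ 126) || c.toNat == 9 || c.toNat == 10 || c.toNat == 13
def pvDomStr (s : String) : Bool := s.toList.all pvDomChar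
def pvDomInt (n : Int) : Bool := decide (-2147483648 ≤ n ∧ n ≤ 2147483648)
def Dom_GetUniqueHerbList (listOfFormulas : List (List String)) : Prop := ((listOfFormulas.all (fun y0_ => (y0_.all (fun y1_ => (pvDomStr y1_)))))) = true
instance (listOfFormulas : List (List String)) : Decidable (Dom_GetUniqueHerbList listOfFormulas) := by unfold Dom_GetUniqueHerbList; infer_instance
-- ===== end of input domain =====

-- B sorts the flattened herb list once and removes adjacent duplicates and junk in a single
-- linear scan, replacing A's quadratic 'not in' membership dedup (objective: faster).

-- ===== PORT A =====
def GetUniqueHerbList (listOfFormulas : List (List String)) : List String :=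
  -- make single list of all of the herbs (nested append loop)
  let singleHerbList : List String :=
    listOfFormulas.foldl (fun acc formula =>
      (PySem.List.slice formula (some 1) none).foldl (fun a herb => a ++ [herb]) acc) []
  -- get a list of just unique herbs ('herb not in uniqueHerbList' membership scan)
  let uniqueHerbList : List String :=
    singleHerbList.foldl (fun acc herb => if herb ∈ acc then acc else acc ++ [herb]) []
  -- remove dirty words ('.remove' deletes the first occurrence = List.erase, exact)
  let u1 : List String := if "" ∈ uniqueHerbList then uniqueHerbList.erase "" else uniqueHerbList
  let u2 : List String := if "?" ∈ u1 then u1.erase "?" else u1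
  PySem.List.sorted u2 (fun x => x) false

-- ===== PORT B =====
def GetUniqueHerbList_alt (listOfFormulas : List (List String)) : List String :=
  let allHerbs : List String :=
    listOfFormulas.foldl (fun acc formula => acc ++ PySem.List.slice formula (some 1) none) []
  let sortedHerbs := PySem.List.sorted allHerbs (fun x => x) false
  -- single pass: keep a herb only if it differs from the previous element and is not junk
  (sortedHerbs.foldl (fun (st : List String × Option String) herb =>
      if some herb ≠ st.2 ∧ herb ≠ "" ∧ herb ≠ "?" then (st.1 ++ [herb], some herb)
      else (st.1, some herb)) ([], none)).1

-- ===== PRECONDITION & SPEC =====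
def Spec_GetUniqueHerbList (listOfFormulas : List (List String)) (out : List String) : Prop := out = GetUniqueHerbList_alt listOfFormulas
instance (listOfFormulas : List (List String)) (out : List String) : Decidable (Spec_GetUniqueHerbList listOfFormulas out) := by unfold Spec_GetUniqueHerbList; infer_instance

-- ===== CLAIM (what is proved, stated in full; the proofs are below) =====
def Claim_equal_GetUniqueHerbList : Prop := ∀ (listOfFormulas : List (List String)), Dom_GetUniqueHerbList listOfFormulas → Spec_GetUniqueHerbList listOfFormulas (GetUniqueHerbList listOfFormulas)

-- ===== LEMMAS AND PROOFS =====

-- B's scan, recursively: the elements appended when scanning s with previous value prev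
def pvBLoop (s : List String) (prev : Option String) : List String :=
  match s with
  | [] => []
  | h :: t =>
    if some h ≠ prev ∧ h ≠ "" ∧ h ≠ "?" then h :: pvBLoop t (some h) else pvBLoop t (some h)

-- 'prev is ≤ every element' invariant
def pvLE (prev : Option String) (x : String) : Prop :=
  match prev with
  | none => True
  | some p => p ≤ x

theorem pvBLoop_foldl (s : List String) (res : List String) (prev : Option String) :
    (s.foldl (fun (st : List String × Option String) herb =>
      if some herb ≠ st.2 ∧ herb ≠ "" ∧ herb ≠ "?" then (st.1 ++ [herb], some herb)
      else (st.1, some herb)) (res, prev)).1 = res ++ pvBLoop s prev := by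
  induction s generalizing res prev with
  | nil => simp [pvBLoop]
  | cons h t ih =>
    simp only [List.foldl_cons, pvBLoop]
    by_cases hc : some h ≠ prev ∧ h ≠ "" ∧ h ≠ "?"
    · simp [hc, ih]
    · simp [hc, ih]

theorem pvBLoop_mem (s : List String) (prev : Option String)
    (h1 : s.Pairwise (· ≤ ·)) (h2 : ∀ y ∈ s, pvLE prev y) (x : String) :
    x ∈ pvBLoop s prev ↔ x ∈ s ∧ some x ≠ prev ∧ x ≠ "" ∧ x ≠ "?" := by
  induction s generalizing prev with
  | nil => simp [pvBLoop]
  | cons h t ih =>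
    have hpw := (List.pairwise_cons.mp h1)
    have ih' := ih (some h) hpw.2 (fun y hy => hpw.1 y hy)
    have hxh : ∀ z, z ∈ t → z ≠ h → some z ≠ prev := by
      intro z hz hzh
      cases prev with
      | none => simp
      | some p =>
        intro hco
        have hzp : z = p := by simpa using hco
        have hph : p ≤ h := h2 h (by simp)
        have hhz : h ≤ z := hpw.1 z hz
        exact hzh (le_antisymm hhz (hzp ▸ hph)).symm
    unfold pvBLoop
    by_cases hc : some h ≠ prev ∧ h ≠ "" ∧ h ≠ "?"
    · simp only [if_pos hc, List.mem_cons]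
      constructor
      · rintro (rfl | hx)
        · exact ⟨Or.inl rfl, hc⟩
        · have := ih'.mp hx
          refine ⟨Or.inr this.1, hxh x this.1 (by simpa using this.2.1), this.2.2⟩
      · rintro ⟨(rfl | hx), hp, hj⟩
        · exact Or.inl rfl
        · by_cases hxe : x = h
          · exact Or.inl hxe
          · exact Or.inr (ih'.mpr ⟨hx, by simpa using hxe, hj⟩)
    · simp only [if_neg hc]
      rw [ih']
      simp only [List.mem_cons]
      constructor
      · rintro ⟨hx, hne, hj⟩
        refine ⟨Or.inr hx, hxh x hx (by simpa using hne), hj⟩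
      · rintro ⟨(rfl | hx), hp, hj⟩
        · exact absurd ⟨by simpa using hp, hj⟩ hc
        · refine ⟨hx, ?_, hj⟩
          -- x ≠ h: if x = h then the failed condition contradicts ⟨hp, hj⟩
          intro hco
          have hxeq : x = h := by simpa using hco
          exact hc (hxeq ▸ ⟨hp, hj⟩)

theorem pvBLoop_pairwise (s : List String) (prev : Option String)
    (h1 : s.Pairwise (· ≤ ·)) (h2 : ∀ y ∈ s, pvLE prev y) :
    (pvBLoop s prev).Pairwise (· < ·) := by
  induction s generalizing prev with
  | nil => simp [pvBLoop]
  | cons h t ih =>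
    have hpw := (List.pairwise_cons.mp h1)
    have inv : ∀ y ∈ t, pvLE (some h) y := fun y hy => hpw.1 y hy
    unfold pvBLoop
    by_cases hc : some h ≠ prev ∧ h ≠ "" ∧ h ≠ "?"
    · simp only [if_pos hc]
      refine List.pairwise_cons.mpr ⟨?_, ih (some h) hpw.2 inv⟩
      intro x hx
      have hm := (pvBLoop_mem t (some h) hpw.2 inv x).mp hx
      have hle : h ≤ x := hpw.1 x hm.1
      have hne : x ≠ h := by simpa using hm.2.1
      exact lt_of_le_of_ne hle (Ne.symm hne)
    · simp only [if_neg hc]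
      exact ih (some h) hpw.2 inv

-- A's dedup fold: nodup, and the members are the members of the input
theorem pvDedup_fold (l : List String) (acc : List String) (hacc : acc.Nodup) :
    (l.foldl (fun acc herb => if herb ∈ acc then acc else acc ++ [herb]) acc).Nodup ∧
    ∀ x, x ∈ l.foldl (fun acc herb => if herb ∈ acc then acc else acc ++ [herb]) acc ↔
      x ∈ acc ∨ x ∈ l := by
  induction l generalizing acc with
  | nil => simpa using hacc
  | cons h t ih =>
    simp only [List.foldl_cons]
    by_cases hm : h ∈ acc
    · simp only [if_pos hm]
      refine ⟨(ih acc hacc).1, fun x => ?_⟩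
      rw [(ih acc hacc).2 x]
      simp only [List.mem_cons]
      constructor
      · rintro (hx | hx) <;> tauto
      · rintro (hx | rfl | hx) <;> tauto
    · simp only [if_neg hm]
      have hacc' : (acc ++ [h]).Nodup := by
        simp [List.nodup_append, hacc]
        intro a ha he
        exact hm (he ▸ ha)
      refine ⟨(ih _ hacc').1, fun x => ?_⟩
      rw [(ih _ hacc').2 x]
      simp only [List.mem_append, List.mem_cons]
      tauto

-- generic flatten-loop shape shared by both ports
theorem pvFlat_fold (L : List (List String)) (g : List String → List String)
    (acc : List String) :
    L.foldl (fun acc f => acc ++ g f) acc = acc ++ L.flatMap g := by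
  induction L generalizing acc with
  | nil => simp
  | cons h t ih => simp [ih]

-- ===== VERDICT (by name: the statement is the Claim_ definition above) =====
theorem GetUniqueHerbList_spec : Claim_equal_GetUniqueHerbList := by
  intro L _
  unfold Spec_GetUniqueHerbList GetUniqueHerbList GetUniqueHerbList_alt
  simp only [PySem.List.foldl_append_singleton_eq_self]
  rw [pvBLoop_foldl, pvFlat_fold]
  simp only [List.nil_append]
  set flat : List String := L.flatMap (fun formula => PySem.List.slice formula (some 1) none) with hflat
  set u : List String := flat.foldl (fun acc herb => if herb ∈ acc then acc else acc ++ [herb]) [] with hu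
  have hud := pvDedup_fold flat [] (by simp)
  have hunodup : u.Nodup := by rw [hu]; exact hud.1
  have humem : ∀ x, x ∈ u ↔ x ∈ flat := by
    intro x; rw [hu]; simpa using hud.2 x
  -- collapse the membership-guarded erases
  have he1 : (if "" ∈ u then u.erase "" else u) = u.erase "" := by
    split_ifs with h
    · rfl
    · exact (List.erase_of_not_mem h).symm
  rw [he1]
  have hn1 : (u.erase "").Nodup := hunodup.erase _
  have he2 : (if "?" ∈ u.erase "" then (u.erase "").erase "?" else u.erase "") =
      (u.erase "").erase "?" := by
    split_ifs with h
    · rfl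
    · exact (List.erase_of_not_mem h).symm
  rw [he2]
  set u2 : List String := (u.erase "").erase "?" with hu2
  have hn2 : u2.Nodup := hn1.erase _
  have hmem2 : ∀ x, x ∈ u2 ↔ x ∈ flat ∧ x ≠ "" ∧ x ≠ "?" := by
    intro x
    rw [hu2, hn1.mem_erase_iff, hunodup.mem_erase_iff, humem]
    tauto
  -- B's scan over the sorted full list
  set s : List String := PySem.List.sorted flat (fun x => x) false with hs
  have hspw : s.Pairwise (· ≤ ·) := by
    rw [hs]; exact PySem.List.sorted_pairwise flat (fun x => x)
  have hB := pvBLoop_mem s none hspw (fun y _ => trivial)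
  have hBpw : (pvBLoop s none).Pairwise (· < ·) :=
    pvBLoop_pairwise s none hspw (fun y _ => trivial)
  have hBnodup : (pvBLoop s none).Nodup := hBpw.nodup
  have hperm : (pvBLoop s none).Perm u2 := by
    rw [List.perm_ext_iff_of_nodup hBnodup hn2]
    intro x
    rw [hB x, hmem2 x, hs, PySem.List.mem_sorted]
    simp
  exact PySem.List.sorted_eq_of_perm_of_pairwise_lt u2 (pvBLoop s none) (fun x => x) hperm hBpw
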